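-- pv_equiv track=rewrite | github.com/williamDalston/POWERBI-CLASS-WEBSITE | scripts/add-videos.py | generate_video_insertion
-- ===== SOURCE A (Python) =====
-- from typing import List, Tuple, Dict, Any
--
-- def generate_chapters(info: Dict[str, Any]) -> List[Tuple[str, int]]:
--     """Generate video chapters based on lesson structure"""
--     chapters = []
--     duration = info.get('duration', 20)
--     total_seconds = duration * 60
--
--     # Determine chapter structure based on content
--     if info.get('has_concept'):
--         chapters.append(('Introduction', 0))
--
--         if info.get('has_labs'):
--             chapters.append(('Concept Overview', int(total_seconds * 0.2)))
--             chapters.append(('Hands-On Lab', int(total_seconds * 0.5)))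
--             chapters.append(('Key Takeaways', int(total_seconds * 0.85)))
--         elif info.get('has_tables'):
--             chapters.append(('Core Concepts', int(total_seconds * 0.25)))
--             chapters.append(('Detailed Explanation', int(total_seconds * 0.6)))
--             chapters.append(('Summary', int(total_seconds * 0.85)))
--         else:
--             chapters.append(('Core Concepts', int(total_seconds * 0.3)))
--             chapters.append(('Practical Examples', int(total_seconds * 0.65)))
--             chapters.append(('Summary', int(total_seconds * 0.85)))
--     elif info.get('has_labs'):
--         chapters.append(('Lab Introduction', 0))
--         chapters.append(('Step-by-Step Walkthrough', int(total_seconds * 0.3)))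
--         chapters.append(('Testing & Validation', int(total_seconds * 0.8)))
--     else:
--         chapters.append(('Introduction', 0))
--         chapters.append(('Main Content', int(total_seconds * 0.3)))
--         chapters.append(('Summary', int(total_seconds * 0.8)))
--
--     return chapters
--
-- def generate_video_insertion(info: Dict[str, Any]) -> str:
--     """Generate the videoUrl and videoChapters fields to insert"""
--     chapters = generate_chapters(info)
--
--     lines = []
--     lines.append('videoUrl: "https://www.youtube.com/watch?v=dQw4w9WgXcQ",')
--     lines.append('videoChapters: [')
--
--     chapter_strs = []
--     for title, timestamp in chapters:
--         chapter_strs.append(f'  {{ title: \'{title}\', timestamp: {timestamp} }}')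
--
--     lines.append(',\n'.join(chapter_strs))
--     lines.append('],')
--
--     return '\n            ' + '\n            '.join(lines)
-- ===== SOURCE B (Python) =====
-- # Branch-free rewrite: the three flags are packed into a 3-bit index into a flat
-- # 8-row table of (title, fraction) rows, and the output string is assembled by
-- # direct concatenation (no lines list / join over lines).
--
-- _CONCEPT_LABS = [('Introduction', 0.0), ('Concept Overview', 0.2),
--                  ('Hands-On Lab', 0.5), ('Key Takeaways', 0.85)]
-- _CONCEPT_TABLES = [('Introduction', 0.0), ('Core Concepts', 0.25),
--                    ('Detailed Explanation', 0.6), ('Summary', 0.85)]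
-- _CONCEPT = [('Introduction', 0.0), ('Core Concepts', 0.3),
--             ('Practical Examples', 0.65), ('Summary', 0.85)]
-- _LABS = [('Lab Introduction', 0.0), ('Step-by-Step Walkthrough', 0.3),
--          ('Testing & Validation', 0.8)]
-- _PLAIN = [('Introduction', 0.0), ('Main Content', 0.3), ('Summary', 0.8)]
--
-- # index = 4*has_concept + 2*has_labs + has_tables
-- _ROWS = [_PLAIN, _PLAIN, _LABS, _LABS,
--          _CONCEPT, _CONCEPT_TABLES, _CONCEPT_LABS, _CONCEPT_LABS]
--
--
-- def generate_video_insertion(info):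
--     idx = (4 * bool(info.get('has_concept'))
--            + 2 * bool(info.get('has_labs'))
--            + bool(info.get('has_tables')))
--     ts = info.get('duration', 20) * 60
--     body = ',\n'.join("  { title: '%s', timestamp: %d }" % (t, int(ts * f))
--                       for t, f in _ROWS[idx])
--     return ('\n            videoUrl: "https://www.youtube.com/watch?v=dQw4w9WgXcQ",'
--             '\n            videoChapters: ['
--             '\n            ' + body +
--             '\n            ],')
-- ===== Notes on version B (the rewrite author's own statement) =====
-- stated objective: alternative
-- what changed: The if/elif decision cascade is removed entirely: the three boolean flags are packed into a 3-bit index into a flat 8-row (title, fraction) table, the chapter strings come from one uniform pass over the selected row, and the output is assembled by direct string concatenation instead of a lines list joined at the end.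
import Mathlib
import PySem

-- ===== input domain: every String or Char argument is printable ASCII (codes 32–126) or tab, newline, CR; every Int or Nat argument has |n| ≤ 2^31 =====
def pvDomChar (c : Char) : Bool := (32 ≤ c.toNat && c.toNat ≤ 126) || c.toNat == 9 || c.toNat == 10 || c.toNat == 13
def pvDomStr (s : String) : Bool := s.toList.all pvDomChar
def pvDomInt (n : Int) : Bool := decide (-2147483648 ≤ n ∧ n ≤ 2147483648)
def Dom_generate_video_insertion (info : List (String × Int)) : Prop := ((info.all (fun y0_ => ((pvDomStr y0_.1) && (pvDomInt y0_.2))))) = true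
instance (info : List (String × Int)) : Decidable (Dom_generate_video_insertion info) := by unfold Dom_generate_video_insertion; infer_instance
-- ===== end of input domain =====

-- B replaces A's if/elif cascade by a 3-bit flag index into a flat 8-row (title, fraction) table
-- and assembles the output by direct concatenation (same output string; alternative, not faster).
-- Shared primitive for Python float semantics: dict truthiness and int(ts * c) for an IEEE-754 double
-- constant c = num / 2^e (|ts| ≤ 60·2^31 fits exactly in a double; the product is rounded to 53 bits
-- nearest-even, then truncated toward zero — exactly Python's int(ts * c)).
def pvTruthy (info : List (String × Int)) (k : String) : Bool :=
  PySem.Dict.getD (PySem.Dict.mk info) k 0 != 0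

def pvRound53 (m : Nat) : Nat × Nat :=
  let k := PySem.Int.bitLength (m : Int)
  if k ≤ 53 then (m, 0)
  else
    let s := k - 53
    let q := m / 2 ^ s
    let r := m % 2 ^ s
    let half := 2 ^ (s - 1)
    (if half < r ∨ (r = half ∧ q % 2 = 1) then q + 1 else q, s)

def pvIntMulFloat (ts num : Int) (e : Nat) : Int :=
  let m := ts * num
  if m = 0 then 0
  else
    let qs := pvRound53 m.natAbs
    let v : Nat := if e ≤ qs.2 then qs.1 * 2 ^ (qs.2 - e) else qs.1 / 2 ^ (e - qs.2)
    if 0 < m then (v : Int) else -(v : Int)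

-- ===== PORT A =====
-- f'  {{ title: \'{title}\', timestamp: {timestamp} }}'
def pvChapterStr (p : String × Int) : String :=
  "  { title: '" ++ p.1 ++ "', timestamp: " ++ PySem.Int.toStr p.2 ++ " }"

def generate_chapters (info : List (String × Int)) : List (String × Int) :=
  let duration := PySem.Dict.getD (PySem.Dict.mk info) "duration" 20
  let total_seconds := duration * 60
  if pvTruthy info "has_concept" then
    if pvTruthy info "has_labs" then
      [("Introduction", 0),
       ("Concept Overview", pvIntMulFloat total_seconds 3602879701896397 54),   -- 0.2
       ("Hands-On Lab", pvIntMulFloat total_seconds 1 1),                        -- 0.5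
       ("Key Takeaways", pvIntMulFloat total_seconds 7656119366529843 53)]       -- 0.85
    else if pvTruthy info "has_tables" then
      [("Introduction", 0),
       ("Core Concepts", pvIntMulFloat total_seconds 1 2),                       -- 0.25
       ("Detailed Explanation", pvIntMulFloat total_seconds 5404319552844595 53),-- 0.6
       ("Summary", pvIntMulFloat total_seconds 7656119366529843 53)]             -- 0.85
    else
      [("Introduction", 0),
       ("Core Concepts", pvIntMulFloat total_seconds 5404319552844595 54),       -- 0.3
       ("Practical Examples", pvIntMulFloat total_seconds 5854679515581645 53),  -- 0.65
       ("Summary", pvIntMulFloat total_seconds 7656119366529843 53)]             -- 0.85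
  else if pvTruthy info "has_labs" then
      [("Lab Introduction", 0),
       ("Step-by-Step Walkthrough", pvIntMulFloat total_seconds 5404319552844595 54), -- 0.3
       ("Testing & Validation", pvIntMulFloat total_seconds 3602879701896397 52)]     -- 0.8
  else
      [("Introduction", 0),
       ("Main Content", pvIntMulFloat total_seconds 5404319552844595 54),        -- 0.3
       ("Summary", pvIntMulFloat total_seconds 3602879701896397 52)]             -- 0.8

def generate_video_insertion (info : List (String × Int)) : String :=
  let chapters := generate_chapters info
  let lines₀ : List String :=
    ["videoUrl: \"https://www.youtube.com/watch?v=dQw4w9WgXcQ\",", "videoChapters: ["]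
  let chapter_strs := chapters.foldl (fun acc p => acc ++ [pvChapterStr p]) []
  let lines := lines₀ ++ [PySem.Str.join ",\n" chapter_strs] ++ ["],"]
  "\n            " ++ PySem.Str.join "\n            " lines

-- ===== PORT B =====
-- float fractions stored as their exact IEEE-754 representation num / 2^e (0.0 is 0 / 2^0)
def pvRowPlain : List (String × Int × Nat) :=
  [("Introduction", 0, 0), ("Main Content", 5404319552844595, 54),
   ("Summary", 3602879701896397, 52)]
def pvRowLabs : List (String × Int × Nat) :=
  [("Lab Introduction", 0, 0), ("Step-by-Step Walkthrough", 5404319552844595, 54),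
   ("Testing & Validation", 3602879701896397, 52)]
def pvRowConcept : List (String × Int × Nat) :=
  [("Introduction", 0, 0), ("Core Concepts", 5404319552844595, 54),
   ("Practical Examples", 5854679515581645, 53), ("Summary", 7656119366529843, 53)]
def pvRowConceptTables : List (String × Int × Nat) :=
  [("Introduction", 0, 0), ("Core Concepts", 1, 2),
   ("Detailed Explanation", 5404319552844595, 53), ("Summary", 7656119366529843, 53)]
def pvRowConceptLabs : List (String × Int × Nat) :=
  [("Introduction", 0, 0), ("Concept Overview", 3602879701896397, 54),
   ("Hands-On Lab", 1, 1), ("Key Takeaways", 7656119366529843, 53)]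

-- _ROWS, indexed by 4*has_concept + 2*has_labs + has_tables
def pvRows : List (List (String × Int × Nat)) :=
  [pvRowPlain, pvRowPlain, pvRowLabs, pvRowLabs,
   pvRowConcept, pvRowConceptTables, pvRowConceptLabs, pvRowConceptLabs]

def generate_video_insertion_alt (info : List (String × Int)) : String :=
  let idx : Nat :=
    (if pvTruthy info "has_concept" then 4 else 0)
    + (if pvTruthy info "has_labs" then 2 else 0)
    + (if pvTruthy info "has_tables" then 1 else 0)
  let ts := PySem.Dict.getD (PySem.Dict.mk info) "duration" 20 * 60
  let body := PySem.Str.join ",\n"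
    ((pvRows.getD idx []).map
      (fun t => "  { title: '" ++ t.1 ++ "', timestamp: "
                  ++ PySem.Int.toStr (pvIntMulFloat ts t.2.1 t.2.2) ++ " }"))
  "\n            videoUrl: \"https://www.youtube.com/watch?v=dQw4w9WgXcQ\","
    ++ "\n            videoChapters: ["
    ++ "\n            " ++ body
    ++ "\n            ],"

-- ===== PRECONDITION & SPEC =====
def Spec_generate_video_insertion (info : List (String × Int)) (out : String) : Prop := out = generate_video_insertion_alt info
instance (info : List (String × Int)) (out : String) : Decidable (Spec_generate_video_insertion info out) := by unfold Spec_generate_video_insertion; infer_instance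

-- ===== CLAIM (what is proved, stated in full; the proofs are below) =====
def Claim_equal_generate_video_insertion : Prop := ∀ (info : List (String × Int)), Dom_generate_video_insertion info → Spec_generate_video_insertion info (generate_video_insertion info)

-- ===== LEMMAS AND PROOFS =====
theorem pvIntMulFloat_zero (ts : Int) : pvIntMulFloat ts 0 0 = 0 := by
  simp [pvIntMulFloat]

-- ===== VERDICT (by name: the statement is the Claim_ definition above) =====
set_option maxRecDepth 4000 in
theorem generate_video_insertion_spec : Claim_equal_generate_video_insertion := by
  intro info _
  unfold Spec_generate_video_insertion generate_video_insertion generate_video_insertion_alt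
    generate_chapters
  by_cases h1 : pvTruthy info "has_concept" = true <;>
  by_cases h2 : pvTruthy info "has_labs" = true <;>
  by_cases h3 : pvTruthy info "has_tables" = true <;>
  (refine String.toList_injective ?_;
   simp [h1, h2, h3, pvRows, pvRowPlain, pvRowLabs, pvRowConcept, pvRowConceptTables,
         pvRowConceptLabs, pvChapterStr, pvIntMulFloat_zero, List.foldl, PySem.Str.join,
         PySem.Chars.join, List.intercalate, List.intersperse, List.flatten])
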